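-- pv_equiv track=rewrite | github.com/wkharu/Chungnam_Competition | lib/weather.py | _forecast_from_items
-- ===== SOURCE A (Python) =====
-- def _forecast_from_items(items: list, now_hour: int) -> tuple[dict[str, str], str | None]:
--     """
--     단기예보 item 목록에서 현재 시각에 가장 가까운 fcstTime 슬롯의 category→값 맵 생성.
--     정확히 현재 시각만 고르면, API가 내준 fcstTime이 한 시간씩 건너뛰는 경우 TMP 등이 비어 20도 기본값이 된다.
--     """
--     by_time: dict[str, dict[str, str]] = {}
--     for item in items:
--         ft = item.get("fcstTime")
--         cat = item.get("category")
--         if not ft or not cat: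
--             continue
--         by_time.setdefault(ft, {})[cat] = item.get("fcstValue", "")
--
--     if not by_time:
--         return {}, None
--
--     # 현재 시각(시)을 4자리 정수와 비교: 14시 → 1400
--     target = now_hour * 100
--
--     def time_key(ft: str) -> int:
--         try:
--             return int(ft)
--         except (TypeError, ValueError):
--             return 0
--
--     # 가장 가까운 발표 슬롯(절대 차 최소)
--     best_ft = min(by_time.keys(), key=lambda ft: abs(time_key(ft) - target))
--     return by_time.get(best_ft, {}), best_ft
-- ===== SOURCE B (Python) =====
-- def _forecast_from_items(items: list, now_hour: int) -> tuple[dict[str, str], str | None]: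
--     target = now_hour * 100
--
--     # pass 1: streaming argmin — pick the nearest valid fcstTime without materializing any map.
--     # Strict '<' keeps the first occurrence on ties, matching min() over first-seen order
--     # (duplicate times have equal distance, so they never displace the incumbent).
--     best_ft = None
--     best_dist = None
--     for item in items:
--         ft = item.get("fcstTime")
--         if not ft or not item.get("category"):
--             continue
--         try:
--             d = abs(int(ft) - target)
--         except (TypeError, ValueError):
--             d = abs(0 - target)
--         if best_ft is None or d < best_dist:
--             best_ft, best_dist = ft, d
--     if best_ft is None:
--         return {}, None
--
--     # pass 2: build only the chosen slot's category map (last write wins).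
--     result = {}
--     for item in items:
--         cat = item.get("category")
--         if cat and item.get("fcstTime") == best_ft:
--             result[cat] = item.get("fcstValue", "")
--     return result, best_ft
-- ===== Notes on version B (the rewrite author's own statement) =====
-- stated objective: alternative
-- what changed: B never builds A's time->(category map) grouping dict: a streaming strict-< argmin pass over the items picks the nearest valid fcstTime directly (no per-time list or dict is materialized), and a second filtered pass builds only that one slot's category map.
import Mathlib
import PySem

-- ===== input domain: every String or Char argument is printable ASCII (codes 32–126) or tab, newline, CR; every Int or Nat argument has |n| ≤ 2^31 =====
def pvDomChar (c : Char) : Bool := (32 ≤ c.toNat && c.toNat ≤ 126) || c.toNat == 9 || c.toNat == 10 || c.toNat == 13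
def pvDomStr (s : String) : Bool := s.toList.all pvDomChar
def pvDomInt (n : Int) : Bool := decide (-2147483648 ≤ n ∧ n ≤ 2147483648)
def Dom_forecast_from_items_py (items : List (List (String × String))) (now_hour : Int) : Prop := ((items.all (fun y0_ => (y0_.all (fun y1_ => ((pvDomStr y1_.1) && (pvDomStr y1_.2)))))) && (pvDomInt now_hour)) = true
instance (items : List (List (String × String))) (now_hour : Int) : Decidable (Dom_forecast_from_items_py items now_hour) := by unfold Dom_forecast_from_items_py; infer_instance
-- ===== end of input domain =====

-- B replaces A's time->(category map) grouping dict with a streaming argmin pass that picks the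
-- nearest valid fcstTime directly, then one filtered pass builds only that slot's map; objective: alternative.

-- ===== PORT A =====
-- item.get(k): first-match lookup in the association list (dict convention)
def pvGet (item : List (String × String)) (k : String) : Option String :=
  (item.find? (fun p => p.1 == k)).map (·.2)

-- item.get("fcstValue", "")
def pvGetV (item : List (String × String)) : String :=
  (pvGet item "fcstValue").getD ""

-- time_key: int(ft) with 0 on ValueError (TypeError is unreachable: keys are strings)
def pvTimeKey (ft : String) : Int := (PySem.Int.ofStr? ft).getD 0

-- loop body: by_time.setdefault(ft, {})[cat] = item.get("fcstValue", "")
def pvStepA (d : PySem.Dict String (PySem.Dict String String)) (item : List (String × String)) :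
    PySem.Dict String (PySem.Dict String String) :=
  match pvGet item "fcstTime", pvGet item "category" with
  | some ft, some cat =>
      if ft = "" ∨ cat = "" then d
      else d.modify ft PySem.Dict.empty (fun inner => inner.insert cat (pvGetV item))
  | _, _ => d

def forecast_from_items_py (items : List (List (String × String))) (now_hour : Int) :
    (List (String × String)) × Option String :=
  let by_time := items.foldl pvStepA PySem.Dict.empty
  if by_time.items = [] then ([], none)
  else
    let target := now_hour * 100
    match PySem.List.min? by_time.keys (fun ft => |pvTimeKey ft - target|) with
    | none => ([], none)  -- unreachable: keys nonempty
    | some best_ft => ((by_time.getD best_ft PySem.Dict.empty).items, some best_ft)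

-- ===== PORT B =====
-- B's own lookup helper (item.get(k))
def pvLook (item : List (String × String)) (k : String) : Option String :=
  (List.find? (fun p => p.1 == k) item).map Prod.snd

-- pass 1: streaming argmin over the items; best carries (ft, cached distance); strict '<' keeps the incumbent on ties
def pvBestLoop (target : Int) (best : Option (String × Int)) :
    List (List (String × String)) → Option (String × Int)
  | [] => best
  | item :: rest =>
      match pvLook item "fcstTime", pvLook item "category" with
      | some f, some c =>
          if f = "" ∨ c = "" then pvBestLoop target best rest
          else
            let d := |(PySem.Int.ofStr? f).getD 0 - target|
            match best with
            | none => pvBestLoop target (some (f, d)) rest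
            | some b =>
                if d < b.2 then pvBestLoop target (some (f, d)) rest
                else pvBestLoop target best rest
      | _, _ => pvBestLoop target best rest

-- pass 2: result[cat] = item.get("fcstValue","") for items whose fcstTime == best_ft
def pvBuild (best : String) : List (List (String × String)) → PySem.Dict String String → PySem.Dict String String
  | [], d => d
  | item :: rest, d =>
      match pvLook item "category" with
      | some c =>
          if c ≠ "" ∧ pvLook item "fcstTime" = some best then
            pvBuild best rest (d.insert c ((pvLook item "fcstValue").getD ""))
          else pvBuild best rest d
      | none => pvBuild best rest d

def forecast_from_items_py_alt (items : List (List (String × String))) (now_hour : Int) :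
    (List (String × String)) × Option String :=
  let target := now_hour * 100
  match pvBestLoop target none items with
  | none => ([], none)
  | some b => ((pvBuild b.1 items PySem.Dict.empty).items, some b.1)

-- ===== PRECONDITION & SPEC =====
def Spec_forecast_from_items_py (items : List (List (String × String))) (now_hour : Int) (out : (List (String × String)) × Option String) : Prop := out = forecast_from_items_py_alt items now_hour
instance (items : List (List (String × String))) (now_hour : Int) (out : (List (String × String)) × Option String) : Decidable (Spec_forecast_from_items_py items now_hour out) := by unfold Spec_forecast_from_items_py; infer_instance

-- ===== CLAIM (what is proved, stated in full; the proofs are below) =====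
def Claim_equal_forecast_from_items_py : Prop := ∀ (items : List (List (String × String))) (now_hour : Int), Dom_forecast_from_items_py items now_hour → Spec_forecast_from_items_py items now_hour (forecast_from_items_py items now_hour)

-- ===== LEMMAS AND PROOFS =====

theorem pvLook_eq (item : List (String × String)) (k : String) : pvLook item k = pvGet item k := rfl

-- the valid fcstTime (if any) an item contributes
def pvValidFt (item : List (String × String)) : Option String :=
  match pvGet item "fcstTime", pvGet item "category" with
  | some ft, some cat => if ft = "" ∨ cat = "" then none else some ft
  | _, _ => none

def pvValid (items : List (List (String × String))) : List String := items.filterMap pvValidFt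

-- the step of PySem.List.min? specialized to key = distance to target
def pvNStep (target : Int) (acc : Option String) (f : String) : Option String :=
  match acc with
  | none => some f
  | some m => if |pvTimeKey f - target| < |pvTimeKey m - target| then some f else some m

-- the step of pvBestLoop in fold form (caches the distance)
def pvMStep (target : Int) (acc : Option (String × Int)) (f : String) : Option (String × Int) :=
  match acc with
  | none => some (f, |pvTimeKey f - target|)
  | some b => if |pvTimeKey f - target| < b.2 then some (f, |pvTimeKey f - target|) else b

-- ---- A side: keys of the grouping dict = the valid times with duplicates dropped ----
theorem pv_keys_step (item : List (String × String))
    (d : PySem.Dict String (PySem.Dict String String)) :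
    (pvStepA d item).keys =
      (match pvValidFt item with
       | none => d.keys
       | some f => PySem.Set.add d.keys f) := by
  unfold pvStepA pvValidFt
  cases hft : pvGet item "fcstTime" with
  | none => rfl
  | some ft =>
    cases hcat : pvGet item "category" with
    | none => rfl
    | some cat =>
      by_cases h : ft = "" ∨ cat = ""
      · simp [h]
      · simp only [if_neg h, PySem.Dict.keys_modify]
        by_cases hc : ft ∈ d.keys
        · rw [PySem.Dict.keys_insert_of_contains _ _ ((PySem.Dict.contains_iff_mem_keys d ft).mpr hc),
            PySem.Set.add_of_mem hc]
        · rw [PySem.Dict.keys_insert_of_not_contains _ _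
            (by simpa using fun hh => hc ((PySem.Dict.contains_iff_mem_keys d ft).mp hh)),
            PySem.Set.add_of_not_mem hc]

theorem pv_keys_eq (items : List (List (String × String)))
    (d : PySem.Dict String (PySem.Dict String String)) :
    (items.foldl pvStepA d).keys = (pvValid items).foldl PySem.Set.add d.keys := by
  induction items generalizing d with
  | nil => rfl
  | cons item rest ih =>
      rw [List.foldl_cons, ih (pvStepA d item)]
      show _ = ((item :: rest).filterMap pvValidFt).foldl PySem.Set.add d.keys
      rw [List.filterMap_cons, pv_keys_step]
      cases pvValidFt item <;> rfl

-- every valid time is a nonempty string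
theorem pv_valid_ne (items : List (List (String × String))) :
    ∀ f ∈ pvValid items, f ≠ "" := by
  intro f hf
  rcases List.mem_filterMap.mp hf with ⟨item, _, hsome⟩
  unfold pvValidFt at hsome
  cases hft : pvGet item "fcstTime" with
  | none => simp [hft] at hsome
  | some ft =>
    cases hcat : pvGet item "category" with
    | none => simp [hft, hcat] at hsome
    | some cat =>
      rw [hft, hcat] at hsome
      by_cases h : ft = "" ∨ cat = ""
      · simp [h] at hsome
      · rw [not_or] at h
        simp only [if_neg (show ¬(ft = "" ∨ cat = "") by tauto), Option.some.injEq] at hsome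
        subst hsome; exact h.1

-- the inner map A stores under a (nonempty) time equals B's filtered second pass
theorem pv_inner_step (item : List (String × String)) (best : String) (hb : best ≠ "")
    (d : PySem.Dict String (PySem.Dict String String)) :
    (pvStepA d item).getD best PySem.Dict.empty =
      (match pvLook item "category" with
       | some c =>
           if c ≠ "" ∧ pvLook item "fcstTime" = some best then
             (d.getD best PySem.Dict.empty).insert c ((pvLook item "fcstValue").getD "")
           else d.getD best PySem.Dict.empty
       | none => d.getD best PySem.Dict.empty) := by
  simp only [pvLook_eq]
  unfold pvStepA
  cases hft : pvGet item "fcstTime" with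
  | none =>
    cases hcat : pvGet item "category" with
    | none => rfl
    | some cat => simp
  | some ft =>
    cases hcat : pvGet item "category" with
    | none => rfl
    | some cat =>
      by_cases h : ft = "" ∨ cat = ""
      · rcases h with h | h
        · subst h
          simp [Ne.symm hb]
        · subst h
          simp
      · rw [not_or] at h
        simp only [if_neg (show ¬(ft = "" ∨ cat = "") by tauto), PySem.Dict.getD_modify]
        by_cases he : ft = best
        · subst he
          simp [h.2, pvGetV]
        · rw [if_neg (fun hh => he hh.symm)]
          simp [fun hh : ft = best => he hh]

theorem pv_inner_eq (items : List (List (String × String))) (best : String) (hb : best ≠ "")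
    (d : PySem.Dict String (PySem.Dict String String)) :
    (items.foldl pvStepA d).getD best PySem.Dict.empty =
      pvBuild best items (d.getD best PySem.Dict.empty) := by
  induction items generalizing d with
  | nil => rfl
  | cons item rest ih =>
      rw [List.foldl_cons, ih (pvStepA d item), pvBuild, pv_inner_step item best hb d]
      cases pvLook item "category" with
      | none => rfl
      | some c =>
          by_cases hcc : c ≠ "" ∧ pvLook item "fcstTime" = some best
          · simp only [if_pos hcc]
          · simp only [if_neg hcc]

-- ---- B side: pvBestLoop in fold form over the valid times ----
theorem pv_bestLoop_eq (items : List (List (String × String))) (target : Int)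
    (acc : Option (String × Int)) :
    pvBestLoop target acc items = (pvValid items).foldl (pvMStep target) acc := by
  induction items generalizing acc with
  | nil => rfl
  | cons item rest ih =>
      show _ = ((item :: rest).filterMap pvValidFt).foldl (pvMStep target) acc
      rw [List.filterMap_cons]
      have hgoal : pvBestLoop target acc (item :: rest) =
          pvBestLoop target
            (match pvValidFt item with
             | none => acc
             | some f => pvMStep target acc f) rest := by
        simp only [pvBestLoop, pvLook_eq]
        unfold pvValidFt
        cases hft : pvGet item "fcstTime" with
        | none => rfl
        | some ft =>
          cases hcat : pvGet item "category" with
          | none => rfl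
          | some cat =>
            by_cases h : ft = "" ∨ cat = ""
            · simp [h]
            · simp only [if_neg h]
              cases acc with
              | none => rfl
              | some b =>
                simp only [pvMStep, pvTimeKey]
                by_cases hd : |(PySem.Int.ofStr? ft).getD 0 - target| < b.2
                · rw [if_pos hd, if_pos hd]
                · rw [if_neg hd, if_neg hd]
      rw [hgoal]
      cases pvValidFt item with
      | none => exact ih acc
      | some f => rw [List.foldl_cons]; exact ih _

-- the cached-distance fold is the min? fold with the pair projected out
theorem pv_mstep_nstep (target : Int) (l : List String) (acc : Option String) :
    l.foldl (pvMStep target) (acc.map (fun m => (m, |pvTimeKey m - target|))) =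
      (l.foldl (pvNStep target) acc).map (fun m => (m, |pvTimeKey m - target|)) := by
  induction l generalizing acc with
  | nil => rfl
  | cons f rest ih =>
      simp only [List.foldl_cons]
      have hstep : pvMStep target (acc.map (fun m => (m, |pvTimeKey m - target|))) f =
          (pvNStep target acc f).map (fun m => (m, |pvTimeKey m - target|)) := by
        cases acc with
        | none => rfl
        | some m =>
            simp only [Option.map_some, pvMStep, pvNStep]
            by_cases hd : |pvTimeKey f - target| < |pvTimeKey m - target|
            · simp [hd]
            · simp [hd]
      rw [hstep]
      exact ih (pvNStep target acc f)

-- min? equals the pvNStep fold (it is that fold, by definition)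
theorem pv_min?_eq (target : Int) (l : List String) :
    PySem.List.min? l (fun ft => |pvTimeKey ft - target|) = l.foldl (pvNStep target) none := by
  unfold PySem.List.min?
  congr 1
  funext acc f
  cases acc <;> rfl

-- running the fold from some m never loses the value and never increases the key
theorem pv_fold_mono (target : Int) (s : List String) (m0 : String) :
    ∀ acc, acc = some m0 →
      ∃ m, s.foldl (pvNStep target) acc = some m ∧ |pvTimeKey m - target| ≤ |pvTimeKey m0 - target| := by
  induction s generalizing m0 with
  | nil => intro acc h; exact ⟨m0, by simp [h], le_refl _⟩
  | cons f rest ih =>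
      intro acc h
      subst h
      simp only [List.foldl_cons, pvNStep]
      by_cases hd : |pvTimeKey f - target| < |pvTimeKey m0 - target|
      · rw [if_pos hd]
        rcases ih f _ rfl with ⟨m, hm, hle⟩
        exact ⟨m, hm, le_trans hle (le_of_lt hd)⟩
      · rw [if_neg hd]
        exact ih m0 _ rfl

-- the fold's result is ≤ every processed element
theorem pv_fold_isMin (target : Int) (s : List String) :
    ∀ acc, ∀ y ∈ s,
      ∃ m, s.foldl (pvNStep target) acc = some m ∧ |pvTimeKey m - target| ≤ |pvTimeKey y - target| := by
  induction s with
  | nil => intro _ y hy; cases hy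
  | cons z rest ih =>
      intro acc y hy
      simp only [List.foldl_cons]
      rcases List.mem_cons.mp hy with hz | hmem
      · subst hz
        have hz1 : ∃ m1, pvNStep target acc y = some m1 ∧ |pvTimeKey m1 - target| ≤ |pvTimeKey y - target| := by
          cases acc with
          | none => exact ⟨y, rfl, le_refl _⟩
          | some m =>
              simp only [pvNStep]
              by_cases hd : |pvTimeKey y - target| < |pvTimeKey m - target|
              · exact ⟨y, by rw [if_pos hd], le_refl _⟩
              · exact ⟨m, by rw [if_neg hd], le_of_not_gt hd⟩
        rcases hz1 with ⟨m1, hm1, hle1⟩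
        rcases pv_fold_mono target rest m1 _ hm1 with ⟨m, hm, hle⟩
        exact ⟨m, hm, le_trans hle hle1⟩
      · exact ih _ y hmem

-- dropping duplicates does not change the strict-< streaming minimum
theorem pv_dedup_min (target : Int) (l : List String) :
    ∀ seen : List String,
      (l.foldl PySem.Set.add seen).foldl (pvNStep target) none =
        l.foldl (pvNStep target) (seen.foldl (pvNStep target) none) := by
  induction l with
  | nil => intro seen; rfl
  | cons x rest ih =>
      intro seen
      simp only [List.foldl_cons]
      rw [ih (PySem.Set.add seen x)]
      congr 1
      by_cases hx : x ∈ seen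
      · rw [PySem.Set.add_of_mem hx]
        rcases pv_fold_isMin target seen none x hx with ⟨m, hm, hle⟩
        rw [hm]
        simp only [pvNStep]
        rw [if_neg (not_lt_of_ge hle)]
      · rw [PySem.Set.add_of_not_mem hx, List.foldl_append]
        rfl

-- ---- main equivalence ----
theorem pv_main (items : List (List (String × String))) (now_hour : Int) :
    forecast_from_items_py items now_hour = forecast_from_items_py_alt items now_hour := by
  simp only [forecast_from_items_py, forecast_from_items_py_alt]
  have hkeys : (items.foldl pvStepA PySem.Dict.empty).keys =
      (pvValid items).foldl PySem.Set.add [] := by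
    simpa using pv_keys_eq items PySem.Dict.empty
  have hkeys_mem : ∀ y, y ∈ (items.foldl pvStepA PySem.Dict.empty).keys ↔ y ∈ pvValid items := by
    intro y
    rw [hkeys]
    exact PySem.Set.mem_ofList (pvValid items) y
  have hbest : pvBestLoop (now_hour * 100) none items =
      (PySem.List.min? (pvValid items) (fun ft => |pvTimeKey ft - now_hour * 100|)).map
        (fun m => (m, |pvTimeKey m - now_hour * 100|)) := by
    rw [pv_bestLoop_eq, pv_min?_eq]
    exact pv_mstep_nstep (now_hour * 100) (pvValid items) none
  have hmink : PySem.List.min? ((items.foldl pvStepA PySem.Dict.empty).keys)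
      (fun ft => |pvTimeKey ft - now_hour * 100|) =
      PySem.List.min? (pvValid items) (fun ft => |pvTimeKey ft - now_hour * 100|) := by
    rw [hkeys, pv_min?_eq, pv_min?_eq]
    have := pv_dedup_min (now_hour * 100) (pvValid items) []
    simpa using this
  by_cases h0 : pvValid items = []
  · have hk : (items.foldl pvStepA PySem.Dict.empty).keys = [] := by
      simp [hkeys, h0]
    have hi : (items.foldl pvStepA PySem.Dict.empty).items = [] := by
      have := hk
      unfold PySem.Dict.keys at this
      exact List.map_eq_nil_iff.mp this
    rw [if_pos hi, hbest, h0]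
    rfl
  · have hne : (items.foldl pvStepA PySem.Dict.empty).keys ≠ [] := by
      intro hk
      apply h0
      rcases hx : pvValid items with _ | ⟨x, xs⟩
      · rfl
      · exfalso
        have : x ∈ pvValid items := by rw [hx]; exact List.mem_cons_self
        have := (hkeys_mem x).mpr this
        simp [hk] at this
    have hine : (items.foldl pvStepA PySem.Dict.empty).items ≠ [] := by
      intro hi
      exact hne (by unfold PySem.Dict.keys; rw [hi]; rfl)
    rw [if_neg hine, hmink, hbest]
    cases hmin : PySem.List.min? (pvValid items) (fun ft => |pvTimeKey ft - now_hour * 100|) with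
    | none => exact absurd ((PySem.List.min?_eq_none_iff _ _).mp hmin) h0
    | some best =>
        have hb : best ≠ "" := pv_valid_ne items best (PySem.List.min?_mem hmin)
        have hin := pv_inner_eq items best hb PySem.Dict.empty
        rw [PySem.Dict.getD_empty] at hin
        simp only [Option.map_some, hin]

-- ===== VERDICT (by name: the statement is the Claim_ definition above) =====
theorem forecast_from_items_py_spec : Claim_equal_forecast_from_items_py := by
  intro items now_hour _
  unfold Spec_forecast_from_items_py
  exact pv_main items now_hour
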